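-- pv_equiv track=rewrite | github.com/IuLax790/Kattis | Composed Rhythms.py | decompose_rhythm
-- ===== SOURCE A (Python) =====
-- def decompose_rhythm(n):
--     groups = []
--
--     # Use as many groups of 3 as possible, leaving remainder as groups of 2
--     while n > 0:
--         if n % 2 == 0:
--             groups.append(2)
--             n -= 2
--         else:
--             groups.append(3)
--             n -= 3
--
--     return groups
-- ===== SOURCE B (Python) =====
-- def decompose_rhythm(n):
--     if n <= 0:
--         return []
--     if n % 2 == 0:
--         return [2] * (n // 2)
--     return [3] + [2] * ((n - 3) // 2)
-- ===== Notes on version B (the rewrite author's own statement) =====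
-- stated objective: simpler
-- what changed: Replaced the per-step subtract-and-append loop by a closed-form parity split: even n gives [2]*(n//2), odd n gives [3]+[2]*((n-3)//2), built with bulk list repetition instead of one append per element.
import Mathlib
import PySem

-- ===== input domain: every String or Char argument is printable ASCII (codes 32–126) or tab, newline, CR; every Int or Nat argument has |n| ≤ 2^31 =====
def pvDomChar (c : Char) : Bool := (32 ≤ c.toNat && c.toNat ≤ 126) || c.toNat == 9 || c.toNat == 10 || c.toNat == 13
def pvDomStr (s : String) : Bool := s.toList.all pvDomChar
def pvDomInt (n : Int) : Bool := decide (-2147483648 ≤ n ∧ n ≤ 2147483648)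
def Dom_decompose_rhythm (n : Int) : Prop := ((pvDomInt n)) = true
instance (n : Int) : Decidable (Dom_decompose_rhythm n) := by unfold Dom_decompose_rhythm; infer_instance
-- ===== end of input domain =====

-- B replaces A's subtract-and-append loop by a closed-form parity split (objective: simpler).

-- ===== PORT A =====
-- A's while-loop, state = (n, groups); `groups.append(x)` is accumulated as a cons
-- and the accumulator reversed on exit; structural recursion on a fuel counter
-- n.toNat (enough: n drops by at least 2 each step), so the loop evaluates fast.
def decompose_rhythm_loop (fuel : Nat) (n : Int) (groups : List Int) : List Int :=
  match fuel with
  | 0 => groups.reverse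
  | fuel + 1 =>
    if n > 0 then
      if PySem.Int.mod n 2 = 0 then decompose_rhythm_loop fuel (n - 2) (2 :: groups)
      else decompose_rhythm_loop fuel (n - 3) (3 :: groups)
    else groups.reverse

def decompose_rhythm (n : Int) : List Int := decompose_rhythm_loop n.toNat n []

-- ===== PORT B =====
def decompose_rhythm_alt (n : Int) : List Int :=
  if n ≤ 0 then []
  else if PySem.Int.mod n 2 = 0 then List.replicate (PySem.Int.floordiv n 2).toNat 2
  else 3 :: List.replicate (PySem.Int.floordiv (n - 3) 2).toNat 2

-- ===== PRECONDITION & SPEC =====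
def Spec_decompose_rhythm (n : Int) (out : List Int) : Prop := out = decompose_rhythm_alt n
instance (n : Int) (out : List Int) : Decidable (Spec_decompose_rhythm n out) := by unfold Spec_decompose_rhythm; infer_instance

-- ===== CLAIM (what is proved, stated in full; the proofs are below) =====
def Claim_equal_decompose_rhythm : Prop := ∀ (n : Int), Dom_decompose_rhythm n → Spec_decompose_rhythm n (decompose_rhythm n)

-- ===== LEMMAS AND PROOFS =====
theorem floordiv_two (n : Int) : PySem.Int.floordiv n 2 = n / 2 :=
  PySem.Int.floordiv_eq_ediv_of_pos (by omega)

theorem mod_two (n : Int) : PySem.Int.mod n 2 = n % 2 :=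
  PySem.Int.mod_eq_emod_of_pos (by omega)

-- one even step of A's loop, expressed on B's closed form
theorem alt_even_step (n : Int) (h : n > 0) (he : n % 2 = 0) :
    2 :: decompose_rhythm_alt (n - 2) = decompose_rhythm_alt n := by
  unfold decompose_rhythm_alt
  simp only [mod_two, floordiv_two]
  by_cases h2 : n - 2 ≤ 0
  · have hn : n = 2 := by omega
    subst hn; decide
  · rw [if_neg h2, if_neg (by omega : ¬ n ≤ 0),
      if_pos (by omega : (n - 2) % 2 = 0), if_pos he]
    have hk : (n / 2).toNat = ((n - 2) / 2).toNat + 1 := by omega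
    rw [hk, List.replicate_succ]

-- one odd step of A's loop, expressed on B's closed form
theorem alt_odd_step (n : Int) (h : n > 0) (he : ¬ n % 2 = 0) :
    3 :: decompose_rhythm_alt (n - 3) = decompose_rhythm_alt n := by
  unfold decompose_rhythm_alt
  simp only [mod_two, floordiv_two]
  by_cases h3 : n - 3 ≤ 0
  · rw [if_pos h3, if_neg (by omega : ¬ n ≤ 0), if_neg he]
    have hk : ((n - 3) / 2).toNat = 0 := by omega
    rw [hk, List.replicate_zero]
  · rw [if_neg h3, if_neg (by omega : ¬ n ≤ 0),
      if_pos (by omega : (n - 3) % 2 = 0), if_neg he]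

theorem alt_nonpos (n : Int) (h : n ≤ 0) : decompose_rhythm_alt n = [] := by
  unfold decompose_rhythm_alt; rw [if_pos h]

theorem loop_eq (fuel : Nat) (n : Int) (g : List Int) (hf : n ≤ (fuel : Int)) :
    decompose_rhythm_loop fuel n g = g.reverse ++ decompose_rhythm_alt n := by
  induction fuel generalizing n g with
  | zero =>
    rw [decompose_rhythm_loop, alt_nonpos n (by exact_mod_cast hf), List.append_nil]
  | succ fuel ih =>
    rw [decompose_rhythm_loop]
    split_ifs with h he
    · rw [ih (n - 2) (2 :: g) (by push_cast at hf ⊢; omega),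
        List.reverse_cons, List.append_assoc]
      rw [mod_two] at he
      rw [List.singleton_append, alt_even_step n h he]
    · rw [ih (n - 3) (3 :: g) (by push_cast at hf ⊢; omega),
        List.reverse_cons, List.append_assoc]
      rw [mod_two] at he
      rw [List.singleton_append, alt_odd_step n h he]
    · rw [alt_nonpos n (by omega), List.append_nil]

-- ===== VERDICT (by name: the statement is the Claim_ definition above) =====
theorem decompose_rhythm_spec : Claim_equal_decompose_rhythm := by
  intro n _
  show decompose_rhythm n = decompose_rhythm_alt n
  rw [decompose_rhythm, loop_eq n.toNat n [] (by omega), List.reverse_nil, List.nil_append]
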